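-- pv_equiv track=rewrite | github.com/satriotsubasa/PowerPlatform-Core | scripts/discover_context.py | prefer_paths_under
-- ===== SOURCE A (Python) =====
-- def single_or_none(values: list[str]) -> str | None:
--     return values[0] if len(values) == 1 else None
--
-- def prefer_paths_under(paths: list[str], parent_paths: list[str]) -> str | None:
--     if not paths:
--         return None
--     if not parent_paths:
--         return single_or_none(paths)
--     matching = []
--     lowered_parents = [normalize_relative_repo_path(parent).lower() for parent in parent_paths]
--     for path in paths:
--         lowered_path = normalize_relative_repo_path(path).lower()
--         if any(lowered_path.startswith(parent + "/") or lowered_path == parent for parent in lowered_parents):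
--             matching.append(path)
--     if len(matching) == 1:
--         return matching[0]
--     return single_or_none(paths)
--
-- def normalize_relative_repo_path(value: str) -> str:
--     return value.replace("\\", "/").strip("/")
-- ===== SOURCE B (Python) =====
-- def normalize_relative_repo_path(value: str) -> str:
--     return value.replace("\\", "/").strip("/")
--
-- def single_or_none(values: list[str]) -> str | None:
--     return values[0] if len(values) == 1 else None
--
-- def prefer_paths_under(paths: list[str], parent_paths: list[str]) -> str | None:
--     if not paths:
--         return None
--     if not parent_paths:
--         return single_or_none(paths)
--     parents = {normalize_relative_repo_path(p).lower() for p in parent_paths}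
--     matching = []
--     for path in paths:
--         lowered = normalize_relative_repo_path(path).lower()
--         # cumulative ancestor prefixes of lowered: one per '/', plus the whole path
--         ancestors = []
--         cur = ""
--         for ch in lowered:
--             if ch == "/":
--                 ancestors.append(cur)
--             cur += ch
--         ancestors.append(cur)
--         if any(a in parents for a in ancestors):
--             matching.append(path)
--     if len(matching) == 1:
--         return matching[0]
--     return single_or_none(paths)
-- ===== Notes on version B (the rewrite author's own statement) =====
-- stated objective: faster
-- what changed: Replaces A's per-path scan over all parents with startswith tests by a hash set of normalized parents probed with the path's own cumulative ancestor prefixes built in one char pass.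
import Mathlib
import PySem

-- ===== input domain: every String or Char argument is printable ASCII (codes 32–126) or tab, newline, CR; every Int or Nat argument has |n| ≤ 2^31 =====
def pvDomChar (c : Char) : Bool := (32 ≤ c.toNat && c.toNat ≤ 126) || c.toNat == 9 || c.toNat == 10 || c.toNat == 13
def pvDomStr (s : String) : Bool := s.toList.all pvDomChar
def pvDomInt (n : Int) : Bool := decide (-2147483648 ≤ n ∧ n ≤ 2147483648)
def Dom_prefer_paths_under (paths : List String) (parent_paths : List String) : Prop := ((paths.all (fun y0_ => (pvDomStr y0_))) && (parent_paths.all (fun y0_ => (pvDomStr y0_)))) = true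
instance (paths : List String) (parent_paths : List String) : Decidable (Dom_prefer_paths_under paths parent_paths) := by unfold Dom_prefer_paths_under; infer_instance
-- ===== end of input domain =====

-- B replaces A's per-parent startswith scan by a hash-set of normalized parents probed with the
-- path's own cumulative ancestor prefixes (idiomatic/faster in the number of parents).

-- ===== PORT A =====
def pv_single_or_none (values : List String) : Option String :=
  if values.length = 1 then PySem.List.pyGet? values 0 else none

def pv_normalize (value : String) : String :=
  PySem.Str.stripChars (PySem.Str.replace value "\\" "/") "/"

def prefer_paths_under (paths : List String) (parent_paths : List String) : Option String :=
  if paths.isEmpty then none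
  else if parent_paths.isEmpty then pv_single_or_none paths
  else
    let lowered_parents := parent_paths.map (fun parent => PySem.Str.lower (pv_normalize parent))
    let matching := paths.foldl (fun acc path =>
      let lowered_path := PySem.Str.lower (pv_normalize path)
      if lowered_parents.any (fun parent =>
          PySem.Str.startswith lowered_path (parent ++ "/") || lowered_path == parent)
      then acc ++ [path] else acc) []
    if matching.length = 1 then PySem.List.pyGet? matching 0 else pv_single_or_none paths

-- ===== PORT B =====
def pv_single_or_none_alt (values : List String) : Option String :=
  if values.length = 1 then PySem.List.pyGet? values 0 else none

def pv_normalize_alt (value : List Char) : List Char :=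
  PySem.Chars.stripChars (PySem.Chars.replace value ['\\'] ['/']) ['/']

-- the char loop of Source B: one ancestor prefix per '/', plus the whole path
def pv_ancestors (p : List Char) : List (List Char) :=
  let st := p.foldl (fun (st : List (List Char) × List Char) ch =>
      if ch == '/' then (st.1 ++ [st.2], st.2 ++ [ch]) else (st.1, st.2 ++ [ch])) ([], [])
  st.1 ++ [st.2]

def prefer_paths_under_alt (paths : List String) (parent_paths : List String) : Option String :=
  if paths.isEmpty then none
  else if parent_paths.isEmpty then pv_single_or_none_alt paths
  else
    let parents : PySem.Set (List Char) :=
      PySem.Set.ofList (parent_paths.map (fun p => PySem.Chars.lower (pv_normalize_alt p.toList)))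
    let matching := paths.foldl (fun acc path =>
      let lowered := PySem.Chars.lower (pv_normalize_alt path.toList)
      if (pv_ancestors lowered).any (fun a => PySem.Set.contains parents a)
      then acc ++ [path] else acc) []
    if matching.length = 1 then PySem.List.pyGet? matching 0 else pv_single_or_none_alt paths

-- ===== PRECONDITION & SPEC =====
def Spec_prefer_paths_under (paths : List String) (parent_paths : List String) (out : Option String) : Prop := out = prefer_paths_under_alt paths parent_paths
instance (paths : List String) (parent_paths : List String) (out : Option String) : Decidable (Spec_prefer_paths_under paths parent_paths out) := by unfold Spec_prefer_paths_under; infer_instance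

-- ===== CLAIM (what is proved, stated in full; the proofs are below) =====
def Claim_equal_prefer_paths_under : Prop := ∀ (paths : List String) (parent_paths : List String), Dom_prefer_paths_under paths parent_paths → Spec_prefer_paths_under paths parent_paths (prefer_paths_under paths parent_paths)

-- ===== LEMMAS AND PROOFS =====

theorem pv_normalize_toList (s : String) :
    (PySem.Str.lower (pv_normalize s)).toList = PySem.Chars.lower (pv_normalize_alt s.toList) := by
  simp [pv_normalize, pv_normalize_alt]

-- recursion describing the ancestor loop
def pv_ancRec (cur : List Char) : List Char → List (List Char)
  | [] => []
  | c :: p => (if c = '/' then [cur] else []) ++ pv_ancRec (cur ++ [c]) p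

theorem pv_fold_anc (p : List Char) : ∀ (acc : List (List Char)) (cur : List Char),
    p.foldl (fun (st : List (List Char) × List Char) ch =>
      if ch == '/' then (st.1 ++ [st.2], st.2 ++ [ch]) else (st.1, st.2 ++ [ch])) (acc, cur)
    = (acc ++ pv_ancRec cur p, cur ++ p) := by
  induction p with
  | nil => intro acc cur; simp [pv_ancRec]
  | cons c p ih =>
    intro acc cur
    rw [List.foldl_cons]
    by_cases hc : c = '/'
    · rw [if_pos (by simp [hc] : (c == '/') = true), ih]
      simp [pv_ancRec, hc]
    · rw [if_neg (by simp [hc] : ¬ (c == '/') = true), ih]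
      simp [pv_ancRec, hc]

theorem pv_mem_ancRec (p : List Char) : ∀ (cur q : List Char),
    q ∈ pv_ancRec cur p ↔ ∃ r, q ++ '/' :: r = cur ++ p ∧ cur.length ≤ q.length := by
  induction p with
  | nil =>
    intro cur q
    simp only [pv_ancRec, List.not_mem_nil, List.append_nil, false_iff]
    rintro ⟨r, hr, hlen⟩
    have := congrArg List.length hr
    simp at this; omega
  | cons c p ih =>
    intro cur q
    constructor
    · intro hq
      simp only [pv_ancRec, List.mem_append] at hq
      rcases hq with hq | hq
      · split_ifs at hq with hc
        · simp at hq
          exact ⟨p, by simp [hq, hc], by simp [hq]⟩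
        · simp at hq
      · rcases (ih (cur ++ [c]) q).mp hq with ⟨r, hr, hlen⟩
        refine ⟨r, by simpa using hr, by simp at hlen; omega⟩
    · rintro ⟨r, hr, hlen⟩
      rcases Nat.eq_or_lt_of_le hlen with heq | hlt
      · -- |q| = |cur| : then q = cur, c = '/', r = p
        have hr' : q ++ '/' :: r = cur ++ c :: p := hr
        have h1 : q = cur ∧ '/' :: r = c :: p :=
          List.append_inj hr' heq.symm
        rcases h1 with ⟨hq, hcp⟩
        have hc : c = '/' := by injection hcp with h _; exact h.symm
        simp [pv_ancRec, hc, hq]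
      · -- |q| > |cur| : the slash lies inside p's region
        have hmem : q ∈ pv_ancRec (cur ++ [c]) p := by
          apply (ih (cur ++ [c]) q).mpr
          exact ⟨r, by simpa using hr, by simp; omega⟩
        simp [pv_ancRec, hmem]

theorem pv_mem_ancestors (p q : List Char) :
    q ∈ pv_ancestors p ↔ (∃ r, q ++ '/' :: r = p) ∨ q = p := by
  have h := pv_fold_anc p [] []
  simp only [pv_ancestors, h]
  simp only [List.nil_append, List.mem_append, List.mem_singleton]
  rw [pv_mem_ancRec]
  simp

theorem pv_pred_eq (pp : List String) (path : String) :
    (pp.map (fun parent => PySem.Str.lower (pv_normalize parent))).any (fun parent =>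
        PySem.Str.startswith (PySem.Str.lower (pv_normalize path)) (parent ++ "/")
          || PySem.Str.lower (pv_normalize path) == parent)
    = (pv_ancestors (PySem.Chars.lower (pv_normalize_alt path.toList))).any (fun a =>
        PySem.Set.contains (PySem.Set.ofList
          (pp.map (fun p => PySem.Chars.lower (pv_normalize_alt p.toList)))) a) := by
  have hbridge : ∀ s : String,
      (PySem.Str.lower (pv_normalize s)).toList = PySem.Chars.lower (pv_normalize_alt s.toList) :=
    pv_normalize_toList
  rw [Bool.eq_iff_iff]
  simp only [List.any_eq_true, List.mem_map, Bool.or_eq_true,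
    PySem.Str.startswith_eq, PySem.Chars.startswith_iff, beq_iff_eq]
  constructor
  · rintro ⟨par, ⟨s, hs, rfl⟩, hcond⟩
    refine ⟨PySem.Chars.lower (pv_normalize_alt s.toList), ?_, ?_⟩
    · rw [pv_mem_ancestors]
      rcases hcond with hpre | heq
      · left
        rw [String.toList_append] at hpre
        rcases hpre with ⟨t, ht⟩
        refine ⟨t, ?_⟩
        rw [← hbridge s, ← hbridge path, ← ht]
        simp
      · right
        rw [← hbridge s, ← hbridge path, heq]
    · have : PySem.Set.contains (PySem.Set.ofList
          (pp.map (fun p => PySem.Chars.lower (pv_normalize_alt p.toList))))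
          (PySem.Chars.lower (pv_normalize_alt s.toList)) = true := by
        rw [PySem.Set.contains_iff, PySem.Set.mem_ofList]
        exact List.mem_map.mpr ⟨s, hs, rfl⟩
      exact this
  · rintro ⟨a, ha, hcont⟩
    rw [PySem.Set.contains_iff, PySem.Set.mem_ofList, List.mem_map] at hcont
    rcases hcont with ⟨s, hs, rfl⟩
    rw [pv_mem_ancestors] at ha
    refine ⟨PySem.Str.lower (pv_normalize s), ⟨s, hs, rfl⟩, ?_⟩
    rcases ha with ⟨r, hr⟩ | heq
    · left
      rw [String.toList_append, hbridge s, hbridge path]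
      exact ⟨r, by simpa using hr⟩
    · right
      apply String.toList_inj.mp
      rw [hbridge s, hbridge path, heq]

-- ===== VERDICT (by name: the statement is the Claim_ definition above) =====
theorem prefer_paths_under_spec : Claim_equal_prefer_paths_under := by
  intro paths parent_paths _
  unfold Spec_prefer_paths_under prefer_paths_under prefer_paths_under_alt
  simp only [pv_single_or_none, pv_single_or_none_alt]
  by_cases h1 : paths.isEmpty
  · simp [h1]
  · by_cases h2 : parent_paths.isEmpty
    · simp [h1, h2]
    · simp only [h1, h2]
      have hstep : (fun (acc : List String) (path : String) =>
          if (parent_paths.map (fun parent => PySem.Str.lower (pv_normalize parent))).any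
              (fun parent => PySem.Str.startswith (PySem.Str.lower (pv_normalize path)) (parent ++ "/")
                || PySem.Str.lower (pv_normalize path) == parent)
          then acc ++ [path] else acc)
          = (fun (acc : List String) (path : String) =>
          if (pv_ancestors (PySem.Chars.lower (pv_normalize_alt path.toList))).any (fun a =>
              PySem.Set.contains (PySem.Set.ofList
                (parent_paths.map (fun p => PySem.Chars.lower (pv_normalize_alt p.toList)))) a)
          then acc ++ [path] else acc) := by
        funext acc path
        rw [pv_pred_eq]
      rw [hstep]
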